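-- pv_equiv track=rewrite | github.com/tuannx/arcade-agent | scripts/compare_baseline.py | _most_common_token
-- ===== SOURCE A (Python) =====
-- def _most_common_token(tokens: list[str], excluded: set[str]) -> str | None:
--     counts: dict[str, int] = {}
--     for token in tokens:
--         if not token or token in excluded:
--             continue
--         counts[token] = counts.get(token, 0) + 1
--     if not counts:
--         return None
--     return sorted(counts.items(), key=lambda item: (-item[1], item[0]))[0][0]
-- ===== SOURCE B (Python) =====
-- def _most_common_token(tokens: list[str], excluded: set[str]) -> str | None:
--     kept = sorted(t for t in tokens if t and t not in excluded)
--     best = None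
--     best_count = 0
--     cur_count = 0
--     prev = None
--     for t in kept:
--         cur_count = cur_count + 1 if t == prev else 1
--         if cur_count > best_count:
--             best = t
--             best_count = cur_count
--         prev = t
--     return best
-- ===== Notes on version B (the rewrite author's own statement) =====
-- stated objective: alternative
-- what changed: Replaces A's dict-counting pass plus a full sort of the (token,count) items by sorting the filtered tokens once and scanning them in one pass, counting consecutive runs and updating the best token only on a strictly larger run count (so alphabetical ties keep the smaller token); no dict and no pair-keyed sort.
import Mathlib
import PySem

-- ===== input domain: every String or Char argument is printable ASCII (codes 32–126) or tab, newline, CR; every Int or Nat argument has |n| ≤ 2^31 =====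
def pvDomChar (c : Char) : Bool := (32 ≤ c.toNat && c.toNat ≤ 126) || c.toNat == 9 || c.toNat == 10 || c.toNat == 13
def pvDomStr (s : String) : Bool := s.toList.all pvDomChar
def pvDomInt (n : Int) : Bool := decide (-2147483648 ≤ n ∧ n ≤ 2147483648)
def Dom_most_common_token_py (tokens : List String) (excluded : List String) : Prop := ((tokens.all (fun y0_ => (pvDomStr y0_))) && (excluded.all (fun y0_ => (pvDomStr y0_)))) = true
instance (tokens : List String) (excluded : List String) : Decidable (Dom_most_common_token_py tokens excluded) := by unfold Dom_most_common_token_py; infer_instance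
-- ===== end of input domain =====

-- B replaces A's dict-counting pass + full sort of the (token, count) items by one sort of the
-- filtered tokens followed by a single run-counting scan (strict '>' keeps the alphabetically
-- first token on tied counts); no dict, no pair-keyed sort (objective: alternative).

-- ===== PORT A =====
def most_common_token_py (tokens : List String) (excluded : List String) : Option String :=
  let counts : PySem.Dict String Int := tokens.foldl
      (fun d token =>
        if token == "" || excluded.contains token then d
        else d.insert token (d.getD token 0 + 1))
      PySem.Dict.empty
  if counts.items = [] then none
  else
    match PySem.List.sorted2 counts.items (fun it => -it.2) (fun it => it.1) with
    | [] => none   -- unreachable: counts is nonempty, so its sorted items list is nonempty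
    | it :: _ => some it.1

-- ===== PORT B =====
-- state st = (best, best_count, cur_count, prev)
def most_common_token_py_alt (tokens : List String) (excluded : List String) : Option String :=
  let kept := PySem.List.sorted (tokens.filter (fun t => !(t == "") && !(excluded.contains t))) (fun t => t)
  (kept.foldl
    (fun (st : Option String × Int × Int × Option String) t =>
      let cur : Int := if st.2.2.2 = some t then st.2.2.1 + 1 else 1
      if cur > st.2.1 then (some t, cur, cur, some t)
      else (st.1, st.2.1, cur, some t))
    (none, 0, 0, none)).1

-- ===== PRECONDITION & SPEC =====
def Spec_most_common_token_py (tokens : List String) (excluded : List String) (out : Option String) : Prop := out = most_common_token_py_alt tokens excluded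
instance (tokens : List String) (excluded : List String) (out : Option String) : Decidable (Spec_most_common_token_py tokens excluded out) := by unfold Spec_most_common_token_py; infer_instance

-- ===== CLAIM (what is proved, stated in full; the proofs are below) =====
def Claim_equal_most_common_token_py : Prop := ∀ (tokens : List String) (excluded : List String), Dom_most_common_token_py tokens excluded → Spec_most_common_token_py tokens excluded (most_common_token_py tokens excluded)

-- ===== LEMMAS AND PROOFS =====

-- The strict lexicographic comparison both ports' library calls use under the hood.
def pvLexLt {α κ₁ κ₂ : Type} [LinearOrder κ₁] [LinearOrder κ₂] (k1 : α → κ₁) (k2 : α → κ₂) (a b : α) : Bool :=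
  decide (k1 a < k1 b) || (!decide (k1 b < k1 a) && decide (k2 a < k2 b))

theorem pvLexLt_iff {α κ₁ κ₂ : Type} [LinearOrder κ₁] [LinearOrder κ₂] (k1 : α → κ₁) (k2 : α → κ₂) (a b : α) :
    pvLexLt k1 k2 a b = true ↔ toLex (k1 a, k2 a) < toLex (k1 b, k2 b) := by
  simp only [pvLexLt, Bool.or_eq_true, Bool.and_eq_true, Bool.not_eq_true', decide_eq_true_eq,
    decide_eq_false_iff_not, Prod.Lex.toLex_lt_toLex]
  constructor
  · rintro (h | ⟨h1, h2⟩)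
    · exact Or.inl h
    · rcases lt_trichotomy (k1 a) (k1 b) with hl | he | hg
      · exact Or.inl hl
      · exact Or.inr ⟨he, h2⟩
      · exact absurd hg h1
  · rintro (h | ⟨h1, h2⟩)
    · exact Or.inl h
    · exact Or.inr ⟨by rw [h1]; exact lt_irrefl _, h2⟩

theorem pvLexLt_irrefl {α κ₁ κ₂ : Type} [LinearOrder κ₁] [LinearOrder κ₂] (k1 : α → κ₁) (k2 : α → κ₂) (a : α) :
    pvLexLt k1 k2 a a = false := by
  rw [← Bool.not_eq_true, pvLexLt_iff]; exact lt_irrefl _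

theorem pvLexLt_asym {α κ₁ κ₂ : Type} [LinearOrder κ₁] [LinearOrder κ₂] (k1 : α → κ₁) (k2 : α → κ₂) (a b : α)
    (h : pvLexLt k1 k2 a b = true) : pvLexLt k1 k2 b a = false := by
  rw [pvLexLt_iff] at h
  rw [← Bool.not_eq_true, pvLexLt_iff]
  exact lt_asymm h

theorem pvLexLt_trans {α κ₁ κ₂ : Type} [LinearOrder κ₁] [LinearOrder κ₂] (k1 : α → κ₁) (k2 : α → κ₂) (a b c : α)
    (hab : pvLexLt k1 k2 a b = true) (hbc : pvLexLt k1 k2 b c = true) : pvLexLt k1 k2 a c = true := by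
  rw [pvLexLt_iff] at *
  exact lt_trans hab hbc

-- insertBy preserves the "no later element is strictly below an earlier one" invariant
theorem pairwise_insertBy {α : Type} (lt : α → α → Bool)
    (hasym : ∀ a b, lt a b = true → lt b a = false)
    (htrans : ∀ a b c, lt a b = true → lt b c = true → lt a c = true)
    (x : α) (l : List α) (h : l.Pairwise (fun a b => lt b a = false)) :
    (PySem.List.insertBy lt x l).Pairwise (fun a b => lt b a = false) := by
  induction l with
  | nil => simp [PySem.List.insertBy]
  | cons y ys ih =>
    rw [List.pairwise_cons] at h
    obtain ⟨hy, hys⟩ := h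
    show (if lt x y = true then x :: y :: ys else y :: PySem.List.insertBy lt x ys).Pairwise _
    split_ifs with hxy
    · refine List.Pairwise.cons ?_ (List.Pairwise.cons hy hys)
      intro z hz
      rcases List.mem_cons.mp hz with rfl | hz
      · exact hasym x z hxy
      · by_contra hc
        have := htrans z x y (by revert hc; cases lt z x <;> simp) hxy
        rw [hy z hz] at this; exact absurd this (by simp)
    · refine List.Pairwise.cons ?_ (ih hys)
      intro z hz
      rcases (PySem.List.mem_insertBy lt x z ys).mp hz with rfl | hz
      · exact Bool.eq_false_iff.mpr (fun hc => hxy hc)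
      · exact hy z hz
    
theorem pairwise_foldl_insertBy {α : Type} (lt : α → α → Bool)
    (hasym : ∀ a b, lt a b = true → lt b a = false)
    (htrans : ∀ a b c, lt a b = true → lt b c = true → lt a c = true)
    (xs : List α) (acc : List α) (hacc : acc.Pairwise (fun a b => lt b a = false)) :
    (xs.foldl (fun acc x => PySem.List.insertBy lt x acc) acc).Pairwise (fun a b => lt b a = false) := by
  induction xs generalizing acc with
  | nil => exact hacc
  | cons x xs ih => exact ih _ (pairwise_insertBy lt hasym htrans x acc hacc)

-- head of sorted2 is a lex-minimum of the input
theorem head_sorted2_min {α κ₁ κ₂ : Type} [LinearOrder κ₁] [LinearOrder κ₂]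
    (xs : List α) (k1 : α → κ₁) (k2 : α → κ₂) {m : α} {t : List α}
    (h : PySem.List.sorted2 xs k1 k2 = m :: t) :
    ∀ y ∈ xs, pvLexLt k1 k2 y m = false := by
  have hsort : PySem.List.sorted2 xs k1 k2 =
      xs.foldl (fun acc x => PySem.List.insertBy (pvLexLt k1 k2) x acc) [] := rfl
  have hpw := pairwise_foldl_insertBy (pvLexLt k1 k2) (pvLexLt_asym k1 k2) (pvLexLt_trans k1 k2) xs [] (by simp)
  rw [← hsort, h, List.pairwise_cons] at hpw
  intro y hy
  have hmem : y ∈ m :: t := by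
    rw [← h]; exact ((PySem.List.sorted2_perm xs k1 k2 false).mem_iff).mpr hy
  rcases List.mem_cons.mp hmem with rfl | hmem
  · exact pvLexLt_irrefl k1 k2 y
  · exact hpw.1 y hmem

-- A's counting loop over all tokens is the Counter of the kept (filtered) tokens
theorem countsA_eq (tokens excluded : List String) :
    tokens.foldl
      (fun d token =>
        if token == "" || excluded.contains token then d
        else d.insert token (d.getD token 0 + 1))
      PySem.Dict.empty
      = PySem.Dict.counter (tokens.filter (fun t => !(t == "") && !(excluded.contains t))) := by
  rw [← PySem.Dict.foldl_insert_getD_add_one_eq_counter, List.foldl_filter]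
  congr 1
  funext d t
  by_cases h1 : t = "" <;> by_cases h2 : t ∈ excluded <;> simp [h1, h2]

-- loop invariant of B's single scan over the sorted kept list:
-- best is the alphabetically first token with the maximum count so far,
-- cur_count is the count of the last (largest) token seen, prev is that token.
theorem scan_spec (l : List String) (hsort : l.Pairwise (fun a b => a ≤ b)) :
    l = [] ∨ ∃ b last,
      l.foldl
        (fun (st : Option String × Int × Int × Option String) t =>
          let cur : Int := if st.2.2.2 = some t then st.2.2.1 + 1 else 1
          if cur > st.2.1 then (some t, cur, cur, some t)
          else (st.1, st.2.1, cur, some t))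
        (none, 0, 0, none)
        = (some b, (l.count b : Int), (l.count last : Int), some last) ∧
      b ∈ l ∧ last ∈ l ∧ (∀ s ∈ l, s ≤ last) ∧
      (∀ t ∈ l, l.count t ≤ l.count b) ∧ (∀ t ∈ l, l.count t = l.count b → b ≤ t) := by
  induction l using List.reverseRecOn with
  | nil => exact Or.inl rfl
  | append_singleton p t ih =>
    right
    have hsortp : p.Pairwise (fun a b => a ≤ b) := hsort.sublist (List.sublist_append_left p [t])
    have hle : ∀ s ∈ p, s ≤ t := by
      intro s hs
      exact (List.pairwise_append.mp hsort).2.2 s hs t (List.mem_singleton_self t)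
    have hcnt : ∀ s : String, (p ++ [t]).count s = p.count s + (if s = t then 1 else 0) := by
      intro s
      rw [List.count_append]
      by_cases h : s = t
      · simp [h]
      · have h' : ¬t = s := fun hh => h hh.symm
        simp [h, h']
    rw [List.foldl_append]
    rcases ih hsortp with rfl | ⟨b, last, hst, hb, hlast, hmaxel, hmax, hleast⟩
    · -- first element
      simp only [List.foldl_cons, List.foldl_nil]
      refine ⟨t, t, ?_, by simp, by simp, by simp, ?_, ?_⟩
      · simp
      · intro s hs; rw [List.mem_singleton.mp hs]
      · intro s hs _; rw [List.mem_singleton.mp hs]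
    · rw [hst]
      simp only [List.foldl_cons, List.foldl_nil]
      have hbne : p ≠ [] := List.ne_nil_of_mem hb
      have hcb : 1 ≤ p.count b := List.count_pos_iff.mpr hb
      by_cases ht : t = last
      · -- t extends the trailing run
        subst ht
        rw [if_pos rfl]
        by_cases hgt : ((p.count t : Int) + 1 > (p.count b : Int))
        · rw [if_pos hgt]
          have hbt : p.count b ≤ p.count t := by exact_mod_cast Int.lt_add_one_iff.mp hgt
          refine ⟨t, t, ?_, by simp, by simp, ?_, ?_, ?_⟩
          · have h1 : (p ++ [t]).count t = p.count t + 1 := by rw [hcnt]; simp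
            rw [h1]; push_cast; ring_nf
          · intro s hs
            rcases List.mem_append.mp hs with hs | hs
            · exact le_trans (hle s hs) (le_refl t)
            · rw [List.mem_singleton.mp hs]
          · intro s hs
            rcases List.mem_append.mp hs with hs | hs
            · by_cases hst' : s = t
              · rw [hst']
              · rw [hcnt s, hcnt t, if_neg hst', if_pos rfl]
                have := hmax s hs
                omega
            · rw [List.mem_singleton.mp hs]
          · intro s hs hcnteq
            by_cases hst' : s = t
            · rw [hst']
            · rcases List.mem_append.mp hs with hs | hs
              · rw [hcnt s, hcnt t, if_neg hst', if_pos rfl] at hcnteq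
                have := hmax s hs
                omega
              · exact absurd (List.mem_singleton.mp hs) hst'
        · rw [if_neg hgt]
          have hbnet : b ≠ t := by
            intro hbt; subst hbt; omega
          refine ⟨b, t, ?_, List.mem_append_left _ hb, by simp, ?_, ?_, ?_⟩
          · rw [hcnt b, hcnt t, if_neg hbnet, if_pos rfl]
            push_cast
            norm_num
          · intro s hs
            rcases List.mem_append.mp hs with hs | hs
            · exact hle s hs
            · rw [List.mem_singleton.mp hs]
          · intro s hs
            rw [hcnt s, hcnt b, if_neg hbnet]
            by_cases hst' : s = t
            · subst hst'; rw [if_pos rfl]; omega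
            · rw [if_neg hst']
              rcases List.mem_append.mp hs with hs | hs
              · have := hmax s hs; omega
              · exact absurd (List.mem_singleton.mp hs) hst'
          · intro s hs hcnteq
            rw [hcnt s, hcnt b, if_neg hbnet] at hcnteq
            by_cases hst' : s = t
            · subst hst'
              exact hle b hb
            · rw [if_neg hst'] at hcnteq
              rcases List.mem_append.mp hs with hs | hs
              · exact hleast s hs (by omega)
              · exact absurd (List.mem_singleton.mp hs) hst'
      · -- t starts a fresh run, strictly above everything in p
        have hlt : (some last : Option String) ≠ some t := by
          intro h; exact ht (Option.some_inj.mp h).symm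
        have hltlt : last < t := lt_of_le_of_ne (hle last hlast) (fun h => ht h.symm)
        have htnp : t ∉ p := by
          intro htp
          exact absurd (le_antisymm (hmaxel t htp) (le_of_lt hltlt)) ht
        have hcntt : p.count t = 0 := List.count_eq_zero.mpr htnp
        have hbnet : b ≠ t := fun h => htnp (h ▸ hb)
        rw [if_neg hlt, if_neg (by omega)]
        refine ⟨b, t, ?_, List.mem_append_left _ hb, by simp, ?_, ?_, ?_⟩
        · rw [hcnt b, hcnt t, if_neg hbnet, if_pos rfl, hcntt]
          norm_num
        · intro s hs
          rcases List.mem_append.mp hs with hs | hs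
          · exact hle s hs
          · rw [List.mem_singleton.mp hs]
        · intro s hs
          rw [hcnt s, hcnt b, if_neg hbnet]
          by_cases hst' : s = t
          · subst hst'; rw [if_pos rfl, hcntt]; omega
          · rw [if_neg hst']
            rcases List.mem_append.mp hs with hs | hs
            · have := hmax s hs; omega
            · exact absurd (List.mem_singleton.mp hs) hst'
        · intro s hs hcnteq
          rw [hcnt s, hcnt b, if_neg hbnet] at hcnteq
          by_cases hst' : s = t
          · subst hst'; exact hle b hb
          · rw [if_neg hst'] at hcnteq
            rcases List.mem_append.mp hs with hs | hs
            · exact hleast s hs (by omega)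
            · exact absurd (List.mem_singleton.mp hs) hst'

-- decode A's boolean lex-minimality into count/order facts
theorem lex_min_decode (kept : List String) (tokA t : String)
    (h : pvLexLt (fun t => -((List.count t kept : Int))) (fun t => t) t tokA = false) :
    kept.count t ≤ kept.count tokA ∧ (kept.count t = kept.count tokA → tokA ≤ t) := by
  rw [← Bool.not_eq_true, pvLexLt_iff, Prod.Lex.toLex_lt_toLex] at h
  push Not at h
  refine ⟨by have h1 := h.1; omega, fun hce => not_lt.mp (h.2 (by rw [hce]))⟩

theorem main_eq (tokens excluded : List String) :
    most_common_token_py tokens excluded = most_common_token_py_alt tokens excluded := by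
  simp only [most_common_token_py, most_common_token_py_alt, countsA_eq tokens excluded]
  cases hk : tokens.filter (fun t => !(t == "") && !(excluded.contains t)) with
  | nil => simp [PySem.Dict.items_counter, PySem.Set.ofList, PySem.List.sorted]
  | cons x xs =>
    have hxmem : x ∈ PySem.Set.ofList (x :: xs) := (PySem.Set.mem_ofList _ _).mpr List.mem_cons_self
    have hitems : (PySem.Dict.counter (x :: xs)).items
        = (PySem.Set.ofList (x :: xs)).map (fun k => (k, (List.count k (x :: xs) : Int))) :=
      PySem.Dict.items_counter (x :: xs)
    have hine : (PySem.Dict.counter (x :: xs)).items ≠ [] := by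
      rw [hitems]
      exact List.ne_nil_of_mem (List.mem_map_of_mem hxmem)
    rw [if_neg hine]
    -- A side: head of sorted2 is a lex-minimum
    rcases hs : PySem.List.sorted2 (PySem.Dict.counter (x :: xs)).items
        (fun it => -it.2) (fun it => it.1) with _ | ⟨it, rest⟩
    · exfalso
      have hperm := PySem.List.sorted2_perm (PySem.Dict.counter (x :: xs)).items
        (fun it => -it.2) (fun it => it.1) false
      rw [hs] at hperm
      exact hine hperm.symm.eq_nil
    · have hitmem : it ∈ (PySem.Dict.counter (x :: xs)).items := by
        have hperm := PySem.List.sorted2_perm (PySem.Dict.counter (x :: xs)).items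
          (fun it => -it.2) (fun it => it.1) false
        exact hperm.mem_iff.mp (by rw [hs]; exact List.mem_cons_self)
      have hAall := head_sorted2_min (PySem.Dict.counter (x :: xs)).items
        (fun it => -it.2) (fun it => it.1) hs
      rw [hitems] at hitmem
      obtain ⟨tokA, htokA, hpair⟩ := List.mem_map.mp hitmem
      -- transfer A's pair-level minimality to token level
      have hAall' : ∀ t ∈ (x :: xs),
          (x :: xs).count t ≤ (x :: xs).count tokA ∧
          ((x :: xs).count t = (x :: xs).count tokA → tokA ≤ t) := by
        intro t ht
        have hmem : (t, (List.count t (x :: xs) : Int)) ∈ (PySem.Dict.counter (x :: xs)).items := by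
          rw [hitems]; exact List.mem_map_of_mem ((PySem.Set.mem_ofList _ _).mpr ht)
        have hlex := hAall _ hmem
        rw [← hpair] at hlex
        exact lex_min_decode (x :: xs) tokA t hlex
      have htokAmem : tokA ∈ (x :: xs) := (PySem.Set.mem_ofList _ _).mp htokA
      -- B side: the run scan over the sorted kept list
      have hsort' := PySem.List.sorted_pairwise (x :: xs) (fun t => t)
      have hperm' := PySem.List.sorted_perm (x :: xs) (fun t => t) false
      rcases scan_spec (PySem.List.sorted (x :: xs) (fun t => t)) hsort' with hnil | ⟨b, last, hst, hb, _, _, hmax, hleast⟩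
      · exfalso
        rw [hnil] at hperm'
        exact List.cons_ne_nil x xs hperm'.symm.eq_nil
      · rw [hst]
        -- translate B's facts from the sorted list back to (x :: xs)
        have hcnteq : ∀ s : String, (PySem.List.sorted (x :: xs) (fun t => t)).count s = (x :: xs).count s :=
          fun s => hperm'.count_eq s
        have hbmem : b ∈ (x :: xs) := hperm'.mem_iff.mp hb
        have hmax' : ∀ t ∈ (x :: xs), (x :: xs).count t ≤ (x :: xs).count b := by
          intro t ht
          rw [← hcnteq t, ← hcnteq b]
          exact hmax t (hperm'.mem_iff.mpr ht)
        have hleast' : ∀ t ∈ (x :: xs), (x :: xs).count t = (x :: xs).count b → b ≤ t := by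
          intro t ht hc
          exact hleast t (hperm'.mem_iff.mpr ht) (by rw [hcnteq t, hcnteq b]; exact hc)
        -- the two minima coincide
        have hcbA : (x :: xs).count b = (x :: xs).count tokA :=
          le_antisymm ((hAall' b hbmem).1) (hmax' tokA htokAmem)
        have h1 : tokA ≤ b := (hAall' b hbmem).2 hcbA
        have h2 : b ≤ tokA := hleast' tokA htokAmem hcbA.symm
        have : tokA = b := le_antisymm h1 h2
        rw [← hpair]
        simpa using this

-- ===== VERDICT (by name: the statement is the Claim_ definition above) =====
theorem most_common_token_py_spec : Claim_equal_most_common_token_py := by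
  intro tokens excluded _
  exact main_eq tokens excluded
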